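-- pv_equiv track=rewrite | github.com/rjovelin/CRM_POPVAR | chemoreceptors.py | find_ambiguous_chemoreceptors
-- ===== SOURCE A (Python) =====
-- def find_ambiguous_chemoreceptors(chemo):
--     '''
--     (dict) -> set
--     Take the dictionnary of chemoreceptor family : set of genes pairs
--     and return a set of ambiguous chemoreceptors that are assigned to multiple
--     families
--     '''
--
--     # create a set of genes that are in more than 1 family
--     overlap = set()
--
--     # create a list of families
--     families = [fam for fam in chemo]
--
--     # compare each family, find overlapping genes and add them to set
--     for i in range(len(families)-1):
--         for j in range(i+1, len(families)):
--             # check that genes are present in both families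
--             if len(chemo[families[i]].intersection(chemo[families[j]])) != 0:
--                 # add all overlapping genes to set
--                 for gene in chemo[families[i]].intersection(chemo[families[j]]):
--                     overlap.add(gene)
--
--     return overlap
-- ===== SOURCE B (Python) =====
-- def find_ambiguous_chemoreceptors(chemo):
--     '''
--     (dict) -> set
--     Single linear pass over all families: a gene seen again in a later family
--     is ambiguous.  Same return value as the pairwise-intersection version.
--     '''
--     seen = set()
--     overlap = set()
--     for genes in chemo.values():
--         for gene in genes:
--             if gene in seen:
--                 overlap.add(gene)
--             else:
--                 seen.add(gene)
--     return overlap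
-- ===== Notes on version B (the rewrite author's own statement) =====
-- stated objective: faster
-- what changed: Replaced the nested loop over all family pairs with its per-pair set intersections by a single linear pass over all genes that keeps a running 'seen' set and flags any gene met in a second family.
import Mathlib
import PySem

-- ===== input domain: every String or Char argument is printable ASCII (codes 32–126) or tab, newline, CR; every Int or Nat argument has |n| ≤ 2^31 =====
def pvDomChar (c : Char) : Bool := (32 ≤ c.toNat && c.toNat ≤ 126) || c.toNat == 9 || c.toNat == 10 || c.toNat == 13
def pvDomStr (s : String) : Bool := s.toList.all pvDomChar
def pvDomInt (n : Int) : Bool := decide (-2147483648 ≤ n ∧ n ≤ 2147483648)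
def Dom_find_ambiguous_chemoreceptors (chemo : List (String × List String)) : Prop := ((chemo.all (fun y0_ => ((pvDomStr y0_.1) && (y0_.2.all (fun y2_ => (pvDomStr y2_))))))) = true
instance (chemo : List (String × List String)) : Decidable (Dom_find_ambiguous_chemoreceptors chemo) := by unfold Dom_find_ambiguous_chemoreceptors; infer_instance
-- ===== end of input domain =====

-- B replaces A's loop over all family PAIRS (an intersection per pair) by ONE linear pass with a
-- running `seen` set that flags genes met in a second family.  The Python function returns a SET
-- (unordered); both ports return its canonical sorted-list representation — a representation
-- choice for the unordered return value, not a step of either algorithm.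

-- ===== PORT A =====
def find_ambiguous_chemoreceptors (chemo : List (String × List String)) : List String :=
  let d := PySem.Dict.mk chemo
  let overlap : PySem.Set String := PySem.Set.empty
  let families := PySem.Dict.keys d
  let overlap :=
    (PySem.List.pyRange 0 ((families.length : Int) - 1)).foldl (fun ov i =>
      (PySem.List.pyRange (i + 1) (families.length : Int)).foldl (fun ov j =>
        let inter := PySem.Set.inter
          (PySem.Set.ofList (PySem.Dict.getD d (PySem.List.pyGetD families i "") []))
          (PySem.Dict.getD d (PySem.List.pyGetD families j "") [])
        if PySem.Set.len inter ≠ 0 then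
          inter.foldl (fun ov gene => PySem.Set.add ov gene) ov
        else ov) ov) overlap
  PySem.List.sorted overlap (fun x => x) false

-- ===== PORT B =====
def find_ambiguous_chemoreceptors_alt (chemo : List (String × List String)) : List String :=
  let d := PySem.Dict.mk chemo
  let st :=
    (PySem.Dict.values d).foldl (fun (st : PySem.Set String × PySem.Set String) genes =>
      genes.foldl (fun st gene =>
        if PySem.Set.contains st.1 gene then (st.1, PySem.Set.add st.2 gene)
        else (PySem.Set.add st.1 gene, st.2)) st)
      (PySem.Set.empty, PySem.Set.empty)
  PySem.List.sorted st.2 (fun x => x) false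

-- ===== PRECONDITION & SPEC =====
-- Pre_ only requires the argument to be a valid model of A's Python input, a dict of sets: no
-- duplicate family keys, no duplicate gene within one family. Every dict of sets the Python
-- function can receive satisfies it; association lists violating it model no such dict.
def Pre_find_ambiguous_chemoreceptors (chemo : List (String × List String)) : Prop :=
  (chemo.map Prod.fst).Nodup ∧ ∀ p ∈ chemo, p.2.Nodup
instance (chemo : List (String × List String)) : Decidable (Pre_find_ambiguous_chemoreceptors chemo) := by
  unfold Pre_find_ambiguous_chemoreceptors; infer_instance
def pvWitness_find_ambiguous_chemoreceptors : (List (String × List String)) :=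
  [("srx", ["g1", "g2"]), ("srab", ["g2", "g3"])]

def Spec_find_ambiguous_chemoreceptors (chemo : List (String × List String)) (out : List String) : Prop := out = find_ambiguous_chemoreceptors_alt chemo
instance (chemo : List (String × List String)) (out : List String) : Decidable (Spec_find_ambiguous_chemoreceptors chemo out) := by unfold Spec_find_ambiguous_chemoreceptors; infer_instance

-- ===== CLAIM (what is proved, stated in full; the proofs are below) =====
def Claim_equal_find_ambiguous_chemoreceptors : Prop := ∀ (chemo : List (String × List String)), Dom_find_ambiguous_chemoreceptors chemo → Pre_find_ambiguous_chemoreceptors chemo → Spec_find_ambiguous_chemoreceptors chemo (find_ambiguous_chemoreceptors chemo)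

-- ===== LEMMAS AND PROOFS =====

-- The two overlap sets (A's, B's) as standalone expressions; `pv_showA/B` pin them to the ports.
def pvOvA (chemo : List (String × List String)) : PySem.Set String :=
  (PySem.List.pyRange 0 (((chemo.map Prod.fst).length : Int) - 1)).foldl (fun ov i =>
    (PySem.List.pyRange (i + 1) ((chemo.map Prod.fst).length : Int)).foldl (fun ov j =>
      let inter := PySem.Set.inter
        (PySem.Set.ofList (PySem.Dict.getD (PySem.Dict.mk chemo) (PySem.List.pyGetD (chemo.map Prod.fst) i "") []))
        (PySem.Dict.getD (PySem.Dict.mk chemo) (PySem.List.pyGetD (chemo.map Prod.fst) j "") [])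
      if PySem.Set.len inter ≠ 0 then
        inter.foldl (fun ov gene => PySem.Set.add ov gene) ov
      else ov) ov) PySem.Set.empty

def pvStB (chemo : List (String × List String)) : PySem.Set String × PySem.Set String :=
  (chemo.map Prod.snd).foldl (fun (st : PySem.Set String × PySem.Set String) genes =>
    genes.foldl (fun st gene =>
      if PySem.Set.contains st.1 gene then (st.1, PySem.Set.add st.2 gene)
      else (PySem.Set.add st.1 gene, st.2)) st)
    (PySem.Set.empty, PySem.Set.empty)

theorem pv_showA (chemo : List (String × List String)) :
    find_ambiguous_chemoreceptors chemo = PySem.List.sorted (pvOvA chemo) (fun x => x) false := rfl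

theorem pv_showB (chemo : List (String × List String)) :
    find_ambiguous_chemoreceptors_alt chemo = PySem.List.sorted (pvStB chemo).2 (fun x => x) false := rfl

-- ---- membership characterisation of B's pass ----

theorem pvB_inner (genes : List String) (hg : genes.Nodup) (s o : PySem.Set String) :
    (∀ g, g ∈ (genes.foldl (fun st gene =>
        if PySem.Set.contains st.1 gene then (st.1, PySem.Set.add st.2 gene)
        else (PySem.Set.add st.1 gene, st.2)) (s, o)).1 ↔ g ∈ s ∨ g ∈ genes) ∧
    (∀ g, g ∈ (genes.foldl (fun st gene =>
        if PySem.Set.contains st.1 gene then (st.1, PySem.Set.add st.2 gene)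
        else (PySem.Set.add st.1 gene, st.2)) (s, o)).2 ↔ g ∈ o ∨ (g ∈ genes ∧ g ∈ s)) := by
  induction genes generalizing s o with
  | nil => simp
  | cons x xs ih =>
    obtain ⟨hx, hxs⟩ := List.nodup_cons.mp hg
    simp only [List.foldl_cons]
    by_cases hmem : x ∈ s
    · rw [if_pos ((PySem.Set.contains_iff _ _).mpr hmem)]
      obtain ⟨ih1, ih2⟩ := ih hxs s (PySem.Set.add o x)
      constructor
      · intro g; rw [ih1]; simp only [List.mem_cons]
        constructor
        · tauto
        · rintro (h | rfl | h) <;> tauto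
      · intro g; rw [ih2]; simp only [PySem.Set.mem_add, List.mem_cons]
        constructor
        · rintro ((h | rfl) | ⟨h1, h2⟩) <;> tauto
        · rintro (h | ⟨(rfl | h1), h2⟩) <;> tauto
    · rw [if_neg (by simp [hmem])]
      obtain ⟨ih1, ih2⟩ := ih hxs (PySem.Set.add s x) o
      constructor
      · intro g; rw [ih1]; simp [PySem.Set.mem_add, List.mem_cons]; tauto
      · intro g; rw [ih2]; simp only [PySem.Set.mem_add, List.mem_cons]
        constructor
        · rintro (h | ⟨h1, h2 | rfl⟩) <;> tauto
        · rintro (h | ⟨rfl | h1, h2⟩) <;> tauto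

theorem pvB_outer (valsL : List (List String)) (hv : ∀ v ∈ valsL, v.Nodup)
    (s o : PySem.Set String) :
    (∀ g, g ∈ (valsL.foldl (fun (st : PySem.Set String × PySem.Set String) genes =>
        genes.foldl (fun st gene =>
          if PySem.Set.contains st.1 gene then (st.1, PySem.Set.add st.2 gene)
          else (PySem.Set.add st.1 gene, st.2)) st) (s, o)).1 ↔
        g ∈ s ∨ 1 ≤ valsL.countP (fun v => decide (g ∈ v))) ∧
    (∀ g, g ∈ (valsL.foldl (fun (st : PySem.Set String × PySem.Set String) genes =>
        genes.foldl (fun st gene =>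
          if PySem.Set.contains st.1 gene then (st.1, PySem.Set.add st.2 gene)
          else (PySem.Set.add st.1 gene, st.2)) st) (s, o)).2 ↔
        g ∈ o ∨ (g ∈ s ∧ 1 ≤ valsL.countP (fun v => decide (g ∈ v))) ∨
          2 ≤ valsL.countP (fun v => decide (g ∈ v))) := by
  induction valsL generalizing s o with
  | nil => simp
  | cons v vs ih =>
    have hvn : v.Nodup := hv v (List.mem_cons_self ..)
    have hvs : ∀ w ∈ vs, w.Nodup := fun w hw => hv w (List.mem_cons_of_mem _ hw)
    simp only [List.foldl_cons]
    obtain ⟨in1, in2⟩ := pvB_inner v hvn s o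
    set st1 := v.foldl (fun st gene =>
          if PySem.Set.contains st.1 gene then (st.1, PySem.Set.add st.2 gene)
          else (PySem.Set.add st.1 gene, st.2)) (s, o) with hst1
    obtain ⟨ih1, ih2⟩ := ih hvs st1.1 st1.2
    constructor
    · intro g
      rw [show (st1.1, st1.2) = st1 from rfl] at ih1
      rw [ih1, in1, List.countP_cons]
      by_cases hgv : g ∈ v <;> simp [hgv]
    · intro g
      rw [show (st1.1, st1.2) = st1 from rfl] at ih2
      rw [ih2, in1, in2, List.countP_cons]
      by_cases hgv : g ∈ v <;> by_cases hgs : g ∈ s <;> simp [hgv, hgs]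
      constructor
      · rintro (h | h | h)
        · tauto
        · tauto
        · right; have h2 := List.countP_pos_iff.mp (by omega : 0 < List.countP (fun v => decide (g ∈ v)) vs)
          simpa using h2
      · rintro (h | h)
        · tauto
        · exact Or.inr (Or.inl h)

-- ---- membership characterisation of A's pairwise loops ----

theorem pvA_gene_loop (t ov : PySem.Set String) (g : String) :
    g ∈ t.foldl (fun ov gene => PySem.Set.add ov gene) ov ↔ g ∈ ov ∨ g ∈ t := by
  simpa using PySem.Set.mem_foldl_add t (fun x => x) ov g

theorem pvA_inner (R : List Int) (f : Int → PySem.Set String) (ov : PySem.Set String) (g : String) :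
    (g ∈ R.foldl (fun ov j =>
        let inter := f j
        if PySem.Set.len inter ≠ 0 then inter.foldl (fun ov gene => PySem.Set.add ov gene) ov
        else ov) ov ↔ g ∈ ov ∨ ∃ j ∈ R, g ∈ f j) := by
  induction R generalizing ov with
  | nil => simp
  | cons j R ih =>
    simp only [List.foldl_cons]
    rw [ih]
    have hstep : (g ∈ (let inter := f j
        if PySem.Set.len inter ≠ 0 then inter.foldl (fun ov gene => PySem.Set.add ov gene) ov
        else ov)) ↔ g ∈ ov ∨ g ∈ f j := by
      show g ∈ (if PySem.Set.len (f j) ≠ 0 then _ else ov) ↔ _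
      split_ifs with h
      · exact pvA_gene_loop (f j) ov g
      · have : f j = [] := by
          simp only [ne_eq, not_not] at h
          simpa [PySem.Set.len] using h
        simp [this]
    rw [hstep]
    simp only [List.mem_cons]
    constructor
    · rintro (h | ⟨jj, hj, hg⟩)
      · rcases h with h | h
        · exact Or.inl h
        · exact Or.inr ⟨j, Or.inl rfl, h⟩
      · exact Or.inr ⟨jj, Or.inr hj, hg⟩
    · rintro (h | ⟨jj, rfl | hj, hg⟩)
      · exact Or.inl (Or.inl h)
      · exact Or.inl (Or.inr hg)
      · exact Or.inr ⟨jj, hj, hg⟩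

theorem pvA_outer (Ri : List Int) (F : Int → List Int) (f : Int → Int → PySem.Set String)
    (ov : PySem.Set String) (g : String) :
    (g ∈ Ri.foldl (fun ov i => (F i).foldl (fun ov j =>
        let inter := f i j
        if PySem.Set.len inter ≠ 0 then inter.foldl (fun ov gene => PySem.Set.add ov gene) ov
        else ov) ov) ov ↔ g ∈ ov ∨ ∃ i ∈ Ri, ∃ j ∈ F i, g ∈ f i j) := by
  induction Ri generalizing ov with
  | nil => simp
  | cons i Ri ih =>
    simp only [List.foldl_cons]
    rw [ih, pvA_inner]
    simp only [List.mem_cons]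
    constructor
    · rintro (h | ⟨ii, hi, hg⟩)
      · rcases h with h | ⟨jj, hj, hg⟩
        · exact Or.inl h
        · exact Or.inr ⟨i, Or.inl rfl, jj, hj, hg⟩
      · exact Or.inr ⟨ii, Or.inr hi, hg⟩
    · rintro (h | ⟨ii, rfl | hi, hg⟩)
      · exact Or.inl (Or.inl h)
      · exact Or.inl (Or.inr hg)
      · exact Or.inr ⟨ii, hi, hg⟩

-- "some pair of positions both containing g" = "g occurs in at least two families"
theorem pv_pairs_iff (vals : List (List String)) (g : String) :
    (∃ a b : Nat, a < b ∧ b < vals.length ∧ g ∈ vals.getD a [] ∧ g ∈ vals.getD b []) ↔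
      2 ≤ vals.countP (fun v => decide (g ∈ v)) := by
  induction vals with
  | nil => simp
  | cons v vs ih =>
    rw [List.countP_cons]
    have hsplit : (∃ a b : Nat, a < b ∧ b < (v :: vs).length ∧
        g ∈ (v :: vs).getD a [] ∧ g ∈ (v :: vs).getD b []) ↔
        ((g ∈ v ∧ ∃ b : Nat, b < vs.length ∧ g ∈ vs.getD b []) ∨
          (∃ a b : Nat, a < b ∧ b < vs.length ∧ g ∈ vs.getD a [] ∧ g ∈ vs.getD b [])) := by
      constructor
      · rintro ⟨a, b, hab, hb, ha', hb'⟩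
        match a, b with
        | 0, b + 1 =>
          exact Or.inl ⟨by simpa using ha', b, by simpa using hb, by simpa using hb'⟩
        | a + 1, b + 1 =>
          exact Or.inr ⟨a, b, by omega, by simpa using hb, by simpa using ha', by simpa using hb'⟩
      · rintro (⟨hv, b, hb, hb'⟩ | ⟨a, b, hab, hb, ha', hb'⟩)
        · exact ⟨0, b + 1, by omega, by simp only [List.length_cons]; omega, by simpa using hv, by simpa using hb'⟩
        · exact ⟨a + 1, b + 1, by omega, by simp only [List.length_cons]; omega, by simpa using ha', by simpa using hb'⟩
    rw [hsplit]
    have hone : (∃ b : Nat, b < vs.length ∧ g ∈ vs.getD b []) ↔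
        1 ≤ vs.countP (fun v => decide (g ∈ v)) := by
      constructor
      · rintro ⟨b, hb, hb'⟩
        refine List.countP_pos_iff.mpr ⟨vs[b], List.getElem_mem _, ?_⟩
        rw [List.getD_eq_getElem vs [] hb] at hb'; simp [hb']
      · intro h
        have h0 : 0 < vs.countP (fun v => decide (g ∈ v)) := by omega
        obtain ⟨w, hw, hgw⟩ := List.countP_pos_iff.mp h0
        obtain ⟨b, hb, rfl⟩ := List.mem_iff_getElem.mp hw
        exact ⟨b, hb, by rw [List.getD_eq_getElem vs [] hb]; simpa using hgw⟩
    rw [hone, ih]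
    by_cases hgv : g ∈ v <;> simp [hgv]
    intro h
    have h0 : 0 < List.countP (fun v => decide (g ∈ v)) vs := by omega
    simpa using List.countP_pos_iff.mp h0

-- ---- the dictionary lookups of A are positional lookups in the association list ----

theorem pv_lookup (chemo : List (String × List String))
    (hkeys : (chemo.map Prod.fst).Nodup) (i : Int) (h0 : 0 ≤ i) (hl : i < (chemo.length : Int)) :
    PySem.Dict.getD (PySem.Dict.mk chemo) (PySem.List.pyGetD (chemo.map Prod.fst) i "") [] =
      (chemo.map Prod.snd).getD i.toNat [] := by
  rw [PySem.List.pyGetD_of_nonneg _ _ h0]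
  have hk : i.toNat < chemo.length := by omega
  rw [List.getD_eq_getElem _ _ (by simpa using hk), List.getElem_map]
  rw [List.getD_eq_getElem _ _ (by simpa using hk), List.getElem_map]
  exact PySem.Dict.getD_of_mem_items _ (by exact List.getElem_mem hk) hkeys []

-- ---- the two overlap sets have the same members: genes in ≥ 2 families ----

theorem pv_memA (chemo : List (String × List String))
    (hkeys : (chemo.map Prod.fst).Nodup) (g : String) :
    g ∈ pvOvA chemo ↔ 2 ≤ (chemo.map Prod.snd).countP (fun v => decide (g ∈ v)) := by
  have h1 := pvA_outer (PySem.List.pyRange 0 (((chemo.map Prod.fst).length : Int) - 1))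
    (fun i => PySem.List.pyRange (i + 1) ((chemo.map Prod.fst).length : Int))
    (fun i j => PySem.Set.inter
      (PySem.Set.ofList (PySem.Dict.getD (PySem.Dict.mk chemo) (PySem.List.pyGetD (chemo.map Prod.fst) i "") []))
      (PySem.Dict.getD (PySem.Dict.mk chemo) (PySem.List.pyGetD (chemo.map Prod.fst) j "") []))
    PySem.Set.empty g
  refine Iff.trans (Iff.trans (show (g ∈ pvOvA chemo) ↔ _ from h1) ?_) (pv_pairs_iff (chemo.map Prod.snd) g)
  simp only [PySem.Set.empty, List.not_mem_nil, false_or, PySem.List.mem_pyRange_one,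
    List.length_map, PySem.Set.mem_inter, PySem.Set.mem_ofList]
  constructor
  · rintro ⟨i, hi, j, hj, hg1, hg2⟩
    rw [pv_lookup chemo hkeys i (by omega) (by omega)] at hg1
    rw [pv_lookup chemo hkeys j (by omega) (by omega)] at hg2
    exact ⟨i.toNat, j.toNat, by omega, by simpa using (by omega : j.toNat < chemo.length), hg1, hg2⟩
  · rintro ⟨a, b, hab, hb, ha, hbm⟩
    refine ⟨(a : Int), by omega, (b : Int), by omega, ?_, ?_⟩
    · rw [pv_lookup chemo hkeys (a : Int) (by omega) (by omega)]; simpa using ha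
    · rw [pv_lookup chemo hkeys (b : Int) (by omega) (by omega)]; simpa using hbm

theorem pv_memB (chemo : List (String × List String))
    (hvals : ∀ p ∈ chemo, p.2.Nodup) (g : String) :
    g ∈ (pvStB chemo).2 ↔ 2 ≤ (chemo.map Prod.snd).countP (fun v => decide (g ∈ v)) := by
  have hv : ∀ v ∈ chemo.map Prod.snd, v.Nodup := by
    intro v hv
    obtain ⟨p, hp, rfl⟩ := List.mem_map.mp hv
    exact hvals p hp
  have h2 := (pvB_outer (chemo.map Prod.snd) hv PySem.Set.empty PySem.Set.empty).2 g
  refine Iff.trans (show (g ∈ (pvStB chemo).2) ↔ _ from h2) ?_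
  simp [PySem.Set.empty]

-- ---- both overlap sets are duplicate-free ----

theorem pv_nodup_gene (t ov : PySem.Set String) (h : ov.Nodup) :
    (t.foldl (fun ov gene => PySem.Set.add ov gene) ov).Nodup :=
  List.foldlRecOn (motive := fun s => s.Nodup) t (fun ov gene => PySem.Set.add ov gene) h
    (fun b hb a _ => PySem.Set.nodup_add b a hb)

theorem pv_nodup_inner (R : List Int) (f : Int → PySem.Set String) (ov : PySem.Set String)
    (h : ov.Nodup) :
    (R.foldl (fun ov j =>
        let inter := f j
        if PySem.Set.len inter ≠ 0 then inter.foldl (fun ov gene => PySem.Set.add ov gene) ov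
        else ov) ov).Nodup :=
  List.foldlRecOn (motive := fun (s : PySem.Set String) => s.Nodup) R _ h (fun b hb a _ => by
    dsimp only
    split_ifs
    · exact pv_nodup_gene _ _ hb
    · exact hb)

theorem pv_nodup_A (chemo : List (String × List String)) : (pvOvA chemo).Nodup :=
  List.foldlRecOn (motive := fun (s : PySem.Set String) => s.Nodup) _ _ List.nodup_nil
    (fun b hb _ _ => pv_nodup_inner _ _ b hb)

theorem pv_nodup_B (chemo : List (String × List String)) : (pvStB chemo).2.Nodup :=
  (List.foldlRecOn (motive := fun (st : PySem.Set String × PySem.Set String) => st.1.Nodup ∧ st.2.Nodup)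
    (chemo.map Prod.snd) _ ⟨List.nodup_nil, List.nodup_nil⟩
    (fun b hb genes _ =>
      List.foldlRecOn (motive := fun (st : PySem.Set String × PySem.Set String) => st.1.Nodup ∧ st.2.Nodup)
        genes _ hb (fun c hc gene _ => by
          dsimp only
          split_ifs
          · exact ⟨hc.1, PySem.Set.nodup_add _ _ hc.2⟩
          · exact ⟨PySem.Set.nodup_add _ _ hc.1, hc.2⟩))).2

-- ===== VERDICT (by name: the statement is the Claim_ definition above) =====
theorem find_ambiguous_chemoreceptors_spec : Claim_equal_find_ambiguous_chemoreceptors := by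
  intro chemo _ hpre
  obtain ⟨hkeys, hvals⟩ := hpre
  unfold Spec_find_ambiguous_chemoreceptors
  rw [pv_showA, pv_showB]
  rw [PySem.List.sorted_id_eq_sorted_id_iff_perm]
  rw [List.perm_ext_iff_of_nodup (pv_nodup_A chemo) (pv_nodup_B chemo)]
  intro g
  rw [pv_memA chemo hkeys g, pv_memB chemo hvals g]
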